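-- pv_equiv track=rewrite | github.com/rhintz42/proflib | proflib/lib/filelib.py | _find_function_line_number
-- ===== SOURCE A (Python) =====
-- def _find_function_line_number(file_lines,
--                                function_def_line_num):
--     """
--     Return the line number of the highest decorator of the function
--
--     Return the line_number of the function definition if no decorators on
--         function
--     """
--     i = function_def_line_num - 1
--     while(i >= 0):
--         if '@' not in file_lines[i] and 'def' not in file_lines[i]:
--             return i + 2 # +1 to accomodate the 0 index of file_lines and +1
--                          #  because the previous line had the last
--                          #  decorator/function definition
--         i -= 1
--
--     if i == 0:
--         return 0
--
--     return function_def_line_num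
-- ===== SOURCE B (Python) =====
-- def _find_function_line_number(file_lines, function_def_line_num):
--     # Single forward pass with an accumulator: remember the last plain line
--     # (no '@' and no 'def') seen below the cutoff; derive the answer from it.
--     last = None
--     for i, line in enumerate(file_lines):
--         if i >= function_def_line_num:
--             break
--         if '@' not in line and 'def' not in line:
--             last = i
--     return function_def_line_num if last is None else last + 2
-- ===== Notes on version B (the rewrite author's own statement) =====
-- stated objective: alternative
-- what changed: A walks backward from the def with an early return at the first plain line; B makes one forward pass over the file keeping an accumulator (index of the last plain line before the cutoff) and derives the answer from it after the loop, never indexing the list.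
import Mathlib
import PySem

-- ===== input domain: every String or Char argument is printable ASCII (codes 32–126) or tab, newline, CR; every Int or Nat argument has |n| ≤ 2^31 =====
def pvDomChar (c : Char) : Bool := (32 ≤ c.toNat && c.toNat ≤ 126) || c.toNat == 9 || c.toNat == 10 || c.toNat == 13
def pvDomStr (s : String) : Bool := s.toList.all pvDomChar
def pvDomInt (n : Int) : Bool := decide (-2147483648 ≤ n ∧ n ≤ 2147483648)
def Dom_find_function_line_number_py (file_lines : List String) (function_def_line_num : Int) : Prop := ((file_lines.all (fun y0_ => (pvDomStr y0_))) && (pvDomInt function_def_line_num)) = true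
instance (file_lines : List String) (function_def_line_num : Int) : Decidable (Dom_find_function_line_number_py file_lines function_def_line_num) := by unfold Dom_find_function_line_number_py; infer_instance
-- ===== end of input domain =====

-- B replaces A's backward early-return walk by ONE FORWARD pass with an accumulator
-- (index of the last plain line before the cutoff) and post-loop arithmetic
-- (objective: alternative decomposition; same asymptotic cost).

-- "line is plain": '@' not in line and 'def' not in line (shared by both ports)
def pvPlain (line : String) : Bool :=
  !(PySem.Str.isIn "@" line) && !(PySem.Str.isIn "def" line)

-- ===== PORT A =====
-- A's while loop, descending i from function_def_line_num - 1; fuel k = i + 1.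
-- Returns some v on the mid-loop return, none when the loop exhausts.
def pvALoop (file_lines : List String) : Nat → Option Int
  | 0 => none
  | k + 1 =>
    if pvPlain (file_lines.getD k "") then
      some ((k : Int) + 2)
    else
      pvALoop file_lines k

def find_function_line_number_py (file_lines : List String) (function_def_line_num : Int) : Int :=
  match pvALoop file_lines function_def_line_num.toNat with
  | some v => v
  | none =>
    -- after the loop i = function_def_line_num - 1 - (number of iterations)
    let i : Int := function_def_line_num - 1 - (function_def_line_num.toNat : Int)
    if i = 0 then 0 else function_def_line_num

-- ===== PORT B =====
-- Source B's forward for-loop over enumerate(file_lines) with break and accumulator `last`.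
def pvBLoop (lines : List String) (n : Int) (i : Nat) (last : Option Nat) : Option Nat :=
  match lines with
  | [] => last
  | line :: rest =>
    if (i : Int) ≥ n then last
    else pvBLoop rest n (i + 1) (if pvPlain line then some i else last)

def find_function_line_number_py_alt (file_lines : List String) (function_def_line_num : Int) : Int :=
  match pvBLoop file_lines function_def_line_num 0 none with
  | none => function_def_line_num
  | some j => (j : Int) + 2

-- ===== PRECONDITION & SPEC =====
-- Pre_ excludes exactly the inputs where A raises IndexError: function_def_line_num
-- larger than the number of lines (file_lines[function_def_line_num-1] is out of range).
def Pre_find_function_line_number_py (file_lines : List String) (function_def_line_num : Int) : Prop :=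
  function_def_line_num ≤ (file_lines.length : Int)
instance (file_lines : List String) (function_def_line_num : Int) : Decidable (Pre_find_function_line_number_py file_lines function_def_line_num) := by unfold Pre_find_function_line_number_py; infer_instance

def pvWitness_find_function_line_number_py : List String × Int := (["@deco", "def f():"], 2)

def Spec_find_function_line_number_py (file_lines : List String) (function_def_line_num : Int) (out : Int) : Prop := out = find_function_line_number_py_alt file_lines function_def_line_num
instance (file_lines : List String) (function_def_line_num : Int) (out : Int) : Decidable (Spec_find_function_line_number_py file_lines function_def_line_num out) := by unfold Spec_find_function_line_number_py; infer_instance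

-- ===== CLAIM (what is proved, stated in full; the proofs are below) =====
def Claim_equal_find_function_line_number_py : Prop := ∀ (file_lines : List String) (function_def_line_num : Int), Dom_find_function_line_number_py file_lines function_def_line_num → Pre_find_function_line_number_py file_lines function_def_line_num → Spec_find_function_line_number_py file_lines function_def_line_num (find_function_line_number_py file_lines function_def_line_num)


-- ===== LEMMAS AND PROOFS =====

-- Proof-only characterisation: index of the LAST plain line of a list.
def pvLastPlain : List String → Option Nat
  | [] => none
  | line :: rest =>
    match pvLastPlain rest with
    | some j => some (j + 1)
    | none => if pvPlain line then some 0 else none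

theorem pvLastPlain_concat (s : List String) (x : String) :
    pvLastPlain (s ++ [x]) = if pvPlain x then some s.length else pvLastPlain s := by
  induction s with
  | nil => simp [pvLastPlain]
  | cons a s ih =>
    simp only [List.cons_append, pvLastPlain, ih]
    by_cases hx : pvPlain x = true
    · simp [hx]
    · simp [hx]

-- A's descending loop returns (last plain index below k) + 2.
theorem pvALoop_eq (file_lines : List String) (k : Nat) (hk : k ≤ file_lines.length) :
    pvALoop file_lines k =
      (pvLastPlain (file_lines.take k)).map (fun j => (j : Int) + 2) := by
  induction k with
  | zero => simp [pvALoop, pvLastPlain]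
  | succ k ih =>
    have hk' : k < file_lines.length := by omega
    have htake : file_lines.take (k + 1) = file_lines.take k ++ [file_lines[k]] := by
      rw [List.take_add_one]
      simp [List.getElem?_eq_getElem hk']
    have hget : file_lines.getD k "" = file_lines[k] := by
      simp [List.getD, List.getElem?_eq_getElem hk']
    have hlen : (file_lines.take k).length = k := by
      simp [List.length_take]; omega
    simp only [pvALoop, hget, htake, pvLastPlain_concat, hlen]
    by_cases hp : pvPlain file_lines[k] = true
    · simp [hp]
    · simp [hp, ih (by omega)]

-- B's forward loop with accumulator: processed segment is the next (n - i) lines.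
theorem pvBLoop_eq (lines : List String) (n : Int) :
    ∀ (i : Nat) (last : Option Nat),
      pvBLoop lines n i last =
        match pvLastPlain (lines.take (n - i).toNat) with
        | some j => some (i + j)
        | none => last := by
  induction lines with
  | nil => intro i last; simp [pvBLoop, pvLastPlain]
  | cons line rest ih =>
    intro i last
    by_cases hge : (i : Int) ≥ n
    · have h0 : (n - (i : Int)).toNat = 0 := by omega
      simp [pvBLoop, hge, h0, pvLastPlain]
    · have h1 : (n - (i : Int)).toNat = (n - ((i : Int) + 1)).toNat + 1 := by omega
      have h2 : ((line :: rest).take ((n - (i : Int)).toNat)) =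
          line :: rest.take ((n - ((i + 1 : Nat) : Int)).toNat) := by
        rw [h1]; push_cast; rfl
      simp only [pvBLoop, if_neg hge, h2, ih (i + 1)]
      simp only [pvLastPlain]
      cases hrest : pvLastPlain (rest.take ((n - ((i + 1 : Nat) : Int)).toNat)) with
      | some j =>
        exact congrArg some (by omega)
      | none =>
        by_cases hp : pvPlain line = true
        · simp [hp]
        · simp [hp]

-- ===== VERDICT (by name: the statement is the Claim_ definition above) =====
theorem find_function_line_number_py_spec : Claim_equal_find_function_line_number_py := by
  intro file_lines n _ hpre
  unfold Spec_find_function_line_number_py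
  unfold find_function_line_number_py find_function_line_number_py_alt
  have hk : n.toNat ≤ file_lines.length := by
    unfold Pre_find_function_line_number_py at hpre; omega
  rw [pvALoop_eq file_lines n.toNat hk, pvBLoop_eq file_lines n 0 none]
  have h0 : (n - ((0 : Nat) : Int)).toNat = n.toNat := by omega
  rw [h0]
  cases h : pvLastPlain (file_lines.take n.toNat) with
  | some j => simp
  | none =>
    rw [if_neg (by omega : ¬ n - 1 - (n.toNat : Int) = 0)]
    rfl
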